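-- pv_equiv track=rewrite | github.com/hyuck0221/mac-cro | macro_recorder.py | _combo_label
-- ===== SOURCE A (Python) =====
-- def _combo_label(keys: list) -> str:
--     modmap = {"Key.cmd": "cmd", "Key.cmd_l": "cmd", "Key.cmd_r": "cmd",
--               "Key.ctrl": "ctrl", "Key.ctrl_l": "ctrl", "Key.ctrl_r": "ctrl",
--               "Key.alt": "alt", "Key.alt_l": "alt", "Key.alt_r": "alt",
--               "Key.shift": "shift", "Key.shift_l": "shift", "Key.shift_r": "shift"}
--     order = {"cmd": 0, "ctrl": 1, "alt": 2, "shift": 3}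
--     parts = []
--     for k in keys:
--         if k in modmap:
--             parts.append(modmap[k])
--         elif k and len(k) == 1:
--             parts.append(k)
--         else:
--             parts.append(k.replace("Key.", ""))
--     parts = list(dict.fromkeys(parts))
--     parts.sort(key=lambda x: (order.get(x, 99), x))
--     return "+".join(parts)
-- ===== SOURCE B (Python) =====
-- _MODS = ("cmd", "ctrl", "alt", "shift")
--
--
-- def _part(k: str) -> str:
--     if k.startswith("Key."):
--         name = k[4:]
--         if name.endswith("_l") or name.endswith("_r"):
--             name = name[:-2]
--         if name in _MODS:
--             return name
--         return k.replace("Key.", "")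
--     if len(k) == 1:
--         return k
--     return k.replace("Key.", "")
--
--
-- def _combo_label(keys: list) -> str:
--     parts = []
--     seen = set()
--     for k in keys:
--         p = _part(k)
--         if p not in seen:
--             parts.append(p)
--             seen.add(p)
--     mods = [m for m in _MODS if m in parts]
--     rest = sorted(p for p in parts if p not in _MODS)
--     return "+".join(mods + rest)
-- ===== Notes on version B (the rewrite author's own statement) =====
-- stated objective: alternative
-- what changed: B replaces the 12-entry dict lookup by prefix/suffix stripping of 'Key.'/'_l'/'_r', fuses deduplication into the mapping loop, and replaces the composite-key sort by two-bucket ordering: modifiers picked in the fixed canonical order, then the remaining parts sorted alphabetically.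
import Mathlib
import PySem

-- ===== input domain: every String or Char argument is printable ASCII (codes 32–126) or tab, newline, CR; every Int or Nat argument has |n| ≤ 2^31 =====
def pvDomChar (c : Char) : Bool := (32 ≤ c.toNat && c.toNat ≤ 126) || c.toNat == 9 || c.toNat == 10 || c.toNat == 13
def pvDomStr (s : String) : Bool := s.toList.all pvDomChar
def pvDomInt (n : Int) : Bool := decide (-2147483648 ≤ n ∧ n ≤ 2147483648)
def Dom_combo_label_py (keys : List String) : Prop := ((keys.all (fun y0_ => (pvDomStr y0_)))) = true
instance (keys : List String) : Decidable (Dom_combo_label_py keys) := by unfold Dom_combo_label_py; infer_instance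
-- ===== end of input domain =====

-- B replaces the per-key 12-entry dict lookup by 'Key.'/'_l'/'_r' prefix/suffix stripping, fuses
-- deduplication into the mapping loop, and orders the result by two buckets (canonical modifiers,
-- then the rest sorted alphabetically) instead of one composite-key sort (objective: alternative).

-- ===== PORT A =====
def modmapA : PySem.Dict String String := PySem.Dict.ofList
  [("Key.cmd", "cmd"), ("Key.cmd_l", "cmd"), ("Key.cmd_r", "cmd"),
   ("Key.ctrl", "ctrl"), ("Key.ctrl_l", "ctrl"), ("Key.ctrl_r", "ctrl"),
   ("Key.alt", "alt"), ("Key.alt_l", "alt"), ("Key.alt_r", "alt"),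
   ("Key.shift", "shift"), ("Key.shift_l", "shift"), ("Key.shift_r", "shift")]

def orderA : PySem.Dict String Int := PySem.Dict.ofList
  [("cmd", 0), ("ctrl", 1), ("alt", 2), ("shift", 3)]

def combo_label_py (keys : List String) : String :=
  let parts := keys.foldl (fun acc k =>
    match modmapA.get? k with
    | some v => acc ++ [v]
    | none =>
      if k ≠ "" ∧ PySem.Str.len k = 1 then acc ++ [k]
      else acc ++ [PySem.Str.replace k "Key." ""]) []
  let parts := PySem.List.dedup parts
  let parts := PySem.List.sorted2 parts (fun x => orderA.getD x 99) (fun x => x)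
  PySem.Str.join "+" parts

-- ===== PORT B =====
def modsB : List String := ["cmd", "ctrl", "alt", "shift"]

def partB (k : String) : String :=
  if PySem.Str.startswith k "Key." then
    let name := PySem.Str.slice k (some 4) none
    let name := if PySem.Str.endswith name "_l" || PySem.Str.endswith name "_r"
                then PySem.Str.slice name none (some (-2)) else name
    if name ∈ modsB then name else PySem.Str.replace k "Key." ""
  else if PySem.Str.len k = 1 then k
  else PySem.Str.replace k "Key." ""

def combo_label_py_alt (keys : List String) : String :=
  let st := keys.foldl (fun st k =>
    let p := partB k
    if p ∈ st.2 then st else (st.1 ++ [p], st.2.add p))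
    (([] : List String), (PySem.Set.empty : PySem.Set String))
  let parts := st.1
  let mods := modsB.filter (fun m => m ∈ parts)
  let rest := PySem.List.sorted (parts.filter (fun p => p ∉ modsB)) (fun x => x)
  PySem.Str.join "+" (mods ++ rest)

-- ===== PRECONDITION & SPEC =====
def Spec_combo_label_py (keys : List String) (out : String) : Prop := out = combo_label_py_alt keys
instance (keys : List String) (out : String) : Decidable (Spec_combo_label_py keys out) := by unfold Spec_combo_label_py; infer_instance

-- ===== CLAIM (what is proved, stated in full; the proofs are below) =====
def Claim_equal_combo_label_py : Prop := ∀ (keys : List String), Dom_combo_label_py keys → Spec_combo_label_py keys (combo_label_py keys)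

-- ===== LEMMAS AND PROOFS =====

-- A's per-key mapping, factored out for the proofs (A's loop appends exactly this value)
def partA (k : String) : String :=
  match modmapA.get? k with
  | some v => v
  | none =>
    if k ≠ "" ∧ PySem.Str.len k = 1 then k
    else PySem.Str.replace k "Key." ""

-- the composite sort key of A, as a single lexicographic key
def lexKey (x : String) : Lex (Int × String) := toLex (orderA.getD x 99, x)

-- the keys of modmapA, as a plain list
def keysA : List String :=
  ["Key.cmd", "Key.cmd_l", "Key.cmd_r", "Key.ctrl", "Key.ctrl_l", "Key.ctrl_r",
   "Key.alt", "Key.alt_l", "Key.alt_r", "Key.shift", "Key.shift_l", "Key.shift_r"]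

theorem foldA_eq (keys : List String) : ∀ acc : List String,
    keys.foldl (fun acc k =>
      match modmapA.get? k with
      | some v => acc ++ [v]
      | none =>
        if k ≠ "" ∧ PySem.Str.len k = 1 then acc ++ [k]
        else acc ++ [PySem.Str.replace k "Key." ""]) acc = acc ++ keys.map partA := by
  induction keys with
  | nil => simp
  | cons k ks ih =>
    intro acc
    simp only [List.foldl_cons, List.map_cons, ih]
    rcases h : modmapA.get? k with _ | v
    · simp only [partA, h]
      split_ifs <;> simp
    · simp [partA, h]

theorem foldB_eq (keys : List String) :
    (keys.foldl (fun st k =>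
      let p := partB k
      if p ∈ st.2 then st else (st.1 ++ [p], st.2.add p))
      (([] : List String), (PySem.Set.empty : PySem.Set String))).1 =
      PySem.List.dedup (keys.map partB) := by
  have h : ∀ (ks : List String) (acc : List String),
      ks.foldl (fun (st : List String × PySem.Set String) k =>
        let p := partB k
        if p ∈ st.2 then st else (st.1 ++ [p], st.2.add p)) (acc, acc) =
      ((ks.map partB).foldl PySem.Set.add acc, (ks.map partB).foldl PySem.Set.add acc) := by
    intro ks
    induction ks with
    | nil => intro acc; simp
    | cons k t ih =>
      intro acc
      simp only [List.foldl_cons, List.map_cons]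
      by_cases hp : partB k ∈ acc
      · have ha : PySem.Set.add acc (partB k) = acc := by
          simp [PySem.Set.add, hp]
        simp only [hp, if_pos, ha]
        exact ih acc
      · have ha : PySem.Set.add acc (partB k) = acc ++ [partB k] := by
          simp [PySem.Set.add, hp]
        simp only [hp, if_false, ha]
        exact ih (acc ++ [partB k])
  rw [show (PySem.Set.empty : PySem.Set String) = ([] : List String) from rfl, h]
  rfl

theorem sorted2_eq_sorted_lex (xs : List String) :
    PySem.List.sorted2 xs (fun x => orderA.getD x 99) (fun x => x) =
      PySem.List.sorted xs lexKey := by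
  simp only [PySem.List.sorted2, PySem.List.sorted]
  congr 1
  funext acc x
  congr 1
  funext a b
  rcases lt_trichotomy (orderA.getD a 99) (orderA.getD b 99) with h | h | h
  · simp [lexKey, Prod.Lex.lt_iff, h, lt_asymm h]
  · simp [lexKey, Prod.Lex.lt_iff, h]
  · simp [lexKey, Prod.Lex.lt_iff, h, lt_asymm h, ne_of_gt h]

theorem rank_of_not_mem (x : String) (hx : x ∉ modsB) : orderA.getD x 99 = 99 := by
  simp only [modsB, List.mem_cons, not_or] at hx
  obtain ⟨h1, h2, h3, h4, -⟩ := hx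
  have ho : orderA = PySem.Dict.mk [("cmd", 0), ("ctrl", 1), ("alt", 2), ("shift", 3)] := by decide
  simp [ho, PySem.Dict.getD, PySem.Dict.get?,
    Ne.symm h1, Ne.symm h2, Ne.symm h3, Ne.symm h4]

theorem rank_lt_of_mem (x : String) (hx : x ∈ modsB) : orderA.getD x 99 < 99 := by
  fin_cases hx <;> decide

theorem bucket_eq_sorted (P : List String) (hnd : P.Nodup) :
    PySem.List.sorted P lexKey =
      modsB.filter (fun m => m ∈ P) ++
        PySem.List.sorted (P.filter (fun p => p ∉ modsB)) (fun x => x) := by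
  apply PySem.List.sorted_eq_of_perm_of_pairwise_lt
  · have h1 : (modsB.filter (fun m => m ∈ P)).Perm (P.filter (fun p => decide (p ∈ modsB))) := by
      apply List.perm_of_nodup_nodup_toFinset_eq
      · exact (by decide : modsB.Nodup).filter _
      · exact hnd.filter _
      · ext a
        simp [and_comm]
    have h2 : (PySem.List.sorted (P.filter (fun p => p ∉ modsB)) (fun x => x)).Perm
        (P.filter (fun p => !decide (p ∈ modsB))) := by
      have := PySem.List.sorted_perm (P.filter (fun p => p ∉ modsB)) (fun x => x) false
      simpa [decide_not] using this
    exact (h1.append h2).trans (List.filter_append_perm _ P)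
  · rw [List.pairwise_append]
    refine ⟨?_, ?_, ?_⟩
    · exact (by decide : modsB.Pairwise (fun a b => lexKey a < lexKey b)).sublist
        (List.filter_sublist)
    · have hle : (PySem.List.sorted (P.filter (fun p => p ∉ modsB)) (fun x => x)).Pairwise
          (fun a b => a ≤ b) :=
        PySem.List.sorted_pairwise (P.filter (fun p => p ∉ modsB)) (fun x => x)
      have hndr : (PySem.List.sorted (P.filter (fun p => p ∉ modsB)) (fun x => x)).Nodup :=
        (PySem.List.sorted_perm _ _ _).symm.nodup (hnd.filter _)
      have hlt := (hle.and hndr).imp (fun {a b} h => lt_of_le_of_ne h.1 h.2)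
      refine hlt.imp_of_mem (fun {a b} ha hb hab => ?_)
      have ha' : a ∉ modsB := by
        have := (PySem.List.mem_sorted _ _ _ _).mp ha
        simpa using (List.mem_filter.mp this).2
      have hb' : b ∉ modsB := by
        have := (PySem.List.mem_sorted _ _ _ _).mp hb
        simpa using (List.mem_filter.mp this).2
      simp [lexKey, Prod.Lex.lt_iff, rank_of_not_mem a ha', rank_of_not_mem b hb', hab]
    · intro a ha b hb
      have ha' : a ∈ modsB := (List.mem_filter.mp ha).1
      have hb' : b ∉ modsB := by
        have := (PySem.List.mem_sorted _ _ _ _).mp hb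
        simpa using (List.mem_filter.mp this).2
      have h1 : orderA.getD a 99 < 99 := rank_lt_of_mem a ha'
      have h2 : orderA.getD b 99 = 99 := rank_of_not_mem b hb'
      simp [lexKey, Prod.Lex.lt_iff]
      omega

theorem modmapA_none_of_not_mem (k : String) (hk : k ∉ keysA) : modmapA.get? k = none := by
  have hm : modmapA = PySem.Dict.mk
    [("Key.cmd", "cmd"), ("Key.cmd_l", "cmd"), ("Key.cmd_r", "cmd"),
     ("Key.ctrl", "ctrl"), ("Key.ctrl_l", "ctrl"), ("Key.ctrl_r", "ctrl"),
     ("Key.alt", "alt"), ("Key.alt_l", "alt"), ("Key.alt_r", "alt"),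
     ("Key.shift", "shift"), ("Key.shift_l", "shift"), ("Key.shift_r", "shift")] := by decide
  simp only [keysA, List.mem_cons, not_or] at hk
  obtain ⟨h1, h2, h3, h4, h5, h6, h7, h8, h9, h10, h11, h12, -⟩ := hk
  simp [hm, PySem.Dict.get?,
    Ne.symm h1, Ne.symm h2, Ne.symm h3, Ne.symm h4, Ne.symm h5, Ne.symm h6,
    Ne.symm h7, Ne.symm h8, Ne.symm h9, Ne.symm h10, Ne.symm h11, Ne.symm h12]

theorem partB_eq_partA_neg (k : String) (hs : ¬ PySem.Str.startswith k "Key." = true) :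
    partB k = partA k := by
  have hnone : modmapA.get? k = none := by
    apply modmapA_none_of_not_mem
    intro hmem
    fin_cases hmem <;> exact hs (by decide)
  simp only [partB, partA, hnone, hs, if_false, Bool.false_eq_true]
  rcases eq_or_ne k.length 1 with hl | hl
  · have hk : k ≠ "" := by intro he; subst he; simp at hl
    simp [hl, hk]
  · simp [hl]

theorem toList_slice4 (k : String) (cs : List Char) (hk : k.toList = "Key.".toList ++ cs) :
    (PySem.Str.slice k (some 4) none).toList = cs := by
  rw [PySem.Str.toList_slice, PySem.Chars.slice_eq_listSlice, hk]
  rw [show (4 : Int) = ((4 : Nat) : Int) by norm_num, PySem.List.slice_from_natCast]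
  simp

theorem toList_sliceNeg2 (s : String) (t : List Char) (c1 c2 : Char)
    (hst : s.toList = t ++ [c1, c2]) :
    (PySem.Str.slice s none (some (-2))).toList = t := by
  rw [PySem.Str.toList_slice, PySem.Chars.slice_eq_listSlice]
  rw [show (-2 : Int) = -((2 : Nat) : Int) by norm_num, PySem.List.slice_to_neg_natCast _ _ (by omega)]
  rw [hst]
  simp [List.take_left']

theorem mem_keysA_of (k : String) (hs : PySem.Str.startswith k "Key." = true)
    (hm : (if PySem.Str.endswith (PySem.Str.slice k (some 4) none) "_l" ||
              PySem.Str.endswith (PySem.Str.slice k (some 4) none) "_r"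
           then PySem.Str.slice (PySem.Str.slice k (some 4) none) none (some (-2))
           else PySem.Str.slice k (some 4) none) ∈ modsB) : k ∈ keysA := by
  rw [PySem.Str.startswith_eq, PySem.Chars.startswith_iff] at hs
  obtain ⟨cs, hcs⟩ := hs
  have hk : k.toList = "Key.".toList ++ cs := hcs.symm
  have hname : (PySem.Str.slice k (some 4) none).toList = cs := toList_slice4 k cs hk
  by_cases hel : PySem.Str.endswith (PySem.Str.slice k (some 4) none) "_l" = true
  · rw [PySem.Str.endswith_eq, PySem.Chars.endswith_iff, hname] at hel
    obtain ⟨t, ht⟩ := hel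
    rw [show "_l".toList = ['_', 'l'] from by decide] at ht
    rw [if_pos (by simp [PySem.Str.endswith_eq, PySem.Chars.endswith_iff, hname, ← ht])] at hm
    have h2 : (PySem.Str.slice (PySem.Str.slice k (some 4) none) none (some (-2))).toList = t :=
      toList_sliceNeg2 _ t '_' 'l' (by rw [hname, ← ht])
    have hkl : k.toList = "Key.".toList ++ (t ++ ['_', 'l']) := by rw [hk, ← ht]
    simp only [modsB, List.mem_cons, List.not_mem_nil, or_false] at hm
    rcases hm with h | h | h | h <;>
      rw [h] at h2 <;>
      [ (have : k = "Key.cmd_l" := String.toList_inj.mp (by rw [hkl, ← h2]; decide));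
        (have : k = "Key.ctrl_l" := String.toList_inj.mp (by rw [hkl, ← h2]; decide));
        (have : k = "Key.alt_l" := String.toList_inj.mp (by rw [hkl, ← h2]; decide));
        (have : k = "Key.shift_l" := String.toList_inj.mp (by rw [hkl, ← h2]; decide))] <;>
      simp [keysA, this]
  · by_cases her : PySem.Str.endswith (PySem.Str.slice k (some 4) none) "_r" = true
    · rw [PySem.Str.endswith_eq, PySem.Chars.endswith_iff, hname] at her
      obtain ⟨t, ht⟩ := her
      rw [show "_r".toList = ['_', 'r'] from by decide] at ht
      rw [if_pos (by simp only [Bool.or_eq_true]; right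
                     simp [PySem.Str.endswith_eq, PySem.Chars.endswith_iff, hname, ← ht])] at hm
      have h2 : (PySem.Str.slice (PySem.Str.slice k (some 4) none) none (some (-2))).toList = t :=
        toList_sliceNeg2 _ t '_' 'r' (by rw [hname, ← ht])
      have hkl : k.toList = "Key.".toList ++ (t ++ ['_', 'r']) := by rw [hk, ← ht]
      simp only [modsB, List.mem_cons, List.not_mem_nil, or_false] at hm
      rcases hm with h | h | h | h <;>
        rw [h] at h2 <;>
        [ (have : k = "Key.cmd_r" := String.toList_inj.mp (by rw [hkl, ← h2]; decide));
          (have : k = "Key.ctrl_r" := String.toList_inj.mp (by rw [hkl, ← h2]; decide));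
          (have : k = "Key.alt_r" := String.toList_inj.mp (by rw [hkl, ← h2]; decide));
          (have : k = "Key.shift_r" := String.toList_inj.mp (by rw [hkl, ← h2]; decide))] <;>
        simp [keysA, this]
    · rw [if_neg (by simp only [Bool.or_eq_true, not_or]; exact ⟨hel, her⟩)] at hm
      simp only [modsB, List.mem_cons, List.not_mem_nil, or_false] at hm
      rcases hm with h | h | h | h <;>
        rw [h] at hname <;>
        [ (have : k = "Key.cmd" := String.toList_inj.mp (by rw [hk, ← hname]; decide));
          (have : k = "Key.ctrl" := String.toList_inj.mp (by rw [hk, ← hname]; decide));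
          (have : k = "Key.alt" := String.toList_inj.mp (by rw [hk, ← hname]; decide));
          (have : k = "Key.shift" := String.toList_inj.mp (by rw [hk, ← hname]; decide))] <;>
        simp [keysA, this]

theorem partB_eq_partA (k : String) : partB k = partA k := by
  by_cases hs : PySem.Str.startswith k "Key." = true
  · by_cases hmem : k ∈ keysA
    · fin_cases hmem <;> decide
    · have hnone := modmapA_none_of_not_mem k hmem
      have hlen : k.toList.length ≠ 1 := by
        rw [PySem.Str.startswith_eq, PySem.Chars.startswith_iff] at hs
        obtain ⟨cs, hcs⟩ := hs
        rw [← hcs]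
        simp
      simp only [partB, partA, hnone, hs, if_true]
      rw [if_neg (fun h => hmem (mem_keysA_of k hs h))]
      rw [if_neg (by simp at hlen ⊢; omega)]
  · exact partB_eq_partA_neg k hs

-- ===== VERDICT (by name: the statement is the Claim_ definition above) =====
theorem combo_label_py_spec : Claim_equal_combo_label_py := by
  intro keys _
  unfold Spec_combo_label_py combo_label_py combo_label_py_alt
  dsimp only
  rw [foldA_eq, foldB_eq]
  simp only [List.nil_append]
  have hmap : keys.map partB = keys.map partA := List.map_congr_left (fun k _ => partB_eq_partA k)
  rw [hmap, sorted2_eq_sorted_lex, bucket_eq_sorted _ (PySem.List.nodup_dedup _)]
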